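-- pv_equiv track=rewrite | github.com/HUAYUE1024/codechat | codechat/chunker.py | _split_by_lines
-- ===== SOURCE A (Python) =====
-- def _split_by_lines(text: str, chunk_size: int, overlap: int) -> list[tuple[str, int, int]]:
--     """Split text into overlapping line-based chunks. Returns (content, start_line, end_line)."""
--     lines = text.splitlines()
--     if not lines:
--         return []
--
--     chunks: list[tuple[str, int, int]] = []
--     start = 0
--
--     while start < len(lines):
--         # Approximate chunk by character count
--         end = start
--         char_count = 0
--         while end < len(lines) and char_count < chunk_size:
--             char_count += len(lines[end]) + 1
--             end += 1
--
--         if end <= start: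
--             end = start + 1
--
--         content = "\n".join(lines[start:end])
--         if content.strip():
--             chunks.append((content, start + 1, end))  # 1-indexed lines
--
--         # Move forward with overlap
--         next_start = end - overlap
--         if next_start <= start:
--             next_start = start + 1
--         start = next_start
--
--     return chunks
-- ===== SOURCE B (Python) =====
-- def _split_by_lines(text: str, chunk_size: int, overlap: int) -> list[tuple[str, int, int]]:
--     """Split text into overlapping line-based chunks. Returns (content, start_line, end_line)."""
--     lines = text.splitlines()
--     n = len(lines)
--     if n == 0:
--         return []
--
--     # Prefix sums: P[i] = sum of len(lines[j]) + 1 for j < i (strictly increasing).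
--     P = [0]
--     for ln in lines:
--         P.append(P[-1] + len(ln) + 1)
--
--     def first_at_least(target: int, lo: int, hi: int) -> int:
--         # Smallest i in [lo, hi] with P[i] >= target, else hi (binary search).
--         while lo < hi:
--             mid = (lo + hi) // 2
--             if P[mid] < target:
--                 lo = mid + 1
--             else:
--                 hi = mid
--         return lo
--
--     chunks: list[tuple[str, int, int]] = []
--     start = 0
--     while start < n:
--         end = first_at_least(P[start] + chunk_size, start + 1, n)
--         content = "\n".join(lines[start:end])
--         if content.strip():
--             chunks.append((content, start + 1, end))
--         next_start = end - overlap
--         if next_start <= start: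
--             next_start = start + 1
--         start = next_start
--     return chunks
-- ===== Notes on version B (the rewrite author's own statement) =====
-- stated objective: alternative
-- what changed: B precomputes a prefix-sum array of line lengths and finds each chunk's end line by binary search on it, replacing A's per-chunk linear accumulation loop (this also makes A's end<=start fallback unnecessary).
import Mathlib
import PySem

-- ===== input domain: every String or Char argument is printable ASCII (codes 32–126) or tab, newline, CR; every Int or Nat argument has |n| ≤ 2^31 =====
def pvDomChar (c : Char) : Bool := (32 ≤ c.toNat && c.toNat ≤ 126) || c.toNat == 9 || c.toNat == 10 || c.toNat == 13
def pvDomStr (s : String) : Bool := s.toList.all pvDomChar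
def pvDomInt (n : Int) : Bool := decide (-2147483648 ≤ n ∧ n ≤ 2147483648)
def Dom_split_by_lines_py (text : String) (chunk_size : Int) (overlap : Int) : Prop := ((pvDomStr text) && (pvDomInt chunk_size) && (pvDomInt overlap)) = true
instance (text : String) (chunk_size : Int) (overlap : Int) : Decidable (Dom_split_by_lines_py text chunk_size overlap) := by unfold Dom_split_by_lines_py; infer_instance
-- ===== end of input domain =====

-- B replaces A's per-chunk linear accumulation loop by a prefix-sum array plus binary
-- search for each chunk's end line (objective: alternative algorithm, same results).

-- ===== PORT A =====
-- inner 'while end < len(lines) and char_count < chunk_size' loop of A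
-- (start is Python's nonnegative int 'end'; lines[end] is in range by the guard, ported as pyGetD)
def pvInnerA (lines : List String) (chunk_size : Int) (e : Nat) (cc : Int) : Nat :=
  if _h : e < lines.length ∧ cc < chunk_size then
    pvInnerA lines chunk_size (e + 1) (cc + PySem.Str.len (PySem.List.pyGetD lines (e : Int) "") + 1)
  else e
termination_by lines.length - e
decreasing_by omega

-- outer 'while start < len(lines)' loop of A (start, the Python int, stays ≥ 0: Nat)
def pvOuterA (lines : List String) (cs ov : Int) (start : Nat)
    (acc : List (String × Int × Int)) : List (String × Int × Int) :=
  if _h : start < lines.length then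
    let e0 := pvInnerA lines cs start 0
    let e := if e0 ≤ start then start + 1 else e0
    let content := PySem.Str.join "\n" (PySem.List.slice lines (some (start : Int)) (some (e : Int)))
    let acc' := if PySem.Str.strip content ≠ "" then acc ++ [(content, (start : Int) + 1, (e : Int))] else acc
    let ns : Int := (e : Int) - ov
    let ns' : Int := if ns ≤ (start : Int) then (start : Int) + 1 else ns
    pvOuterA lines cs ov ns'.toNat acc'
  else acc
termination_by lines.length - start
decreasing_by split_ifs <;> omega

def split_by_lines_py (text : String) (chunk_size : Int) (overlap : Int) : List (String × Int × Int) :=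
  let lines := PySem.Str.splitlines text
  if lines = [] then [] else pvOuterA lines chunk_size overlap 0 []

-- ===== PORT B =====
-- 'P = [0]; for ln in lines: P.append(P[-1] + len(ln) + 1)'
def pvBuildP (lines : List String) : List Int :=
  lines.foldl (fun P ln => P ++ [PySem.List.pyGetD P (-1) 0 + PySem.Str.len ln + 1]) [0]

-- B's first_at_least binary search ((lo+hi)//2 on nonnegative ints = Nat division)
def pvBisect (P : List Int) (target : Int) (lo hi : Nat) : Nat :=
  if lo < hi then
    let mid := (lo + hi) / 2
    if PySem.List.pyGetD P (mid : Int) 0 < target then pvBisect P target (mid + 1) hi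
    else pvBisect P target lo mid
  else lo
termination_by hi - lo
decreasing_by all_goals omega

-- B's outer while loop
def pvOuterB (lines : List String) (P : List Int) (cs ov : Int) (start : Nat)
    (acc : List (String × Int × Int)) : List (String × Int × Int) :=
  if _h : start < lines.length then
    let e := pvBisect P (PySem.List.pyGetD P (start : Int) 0 + cs) (start + 1) lines.length
    let content := PySem.Str.join "\n" (PySem.List.slice lines (some (start : Int)) (some (e : Int)))
    let acc' := if PySem.Str.strip content ≠ "" then acc ++ [(content, (start : Int) + 1, (e : Int))] else acc
    let ns : Int := (e : Int) - ov
    let ns' : Int := if ns ≤ (start : Int) then (start : Int) + 1 else ns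
    pvOuterB lines P cs ov ns'.toNat acc'
  else acc
termination_by lines.length - start
decreasing_by split_ifs <;> omega

def split_by_lines_py_alt (text : String) (chunk_size : Int) (overlap : Int) : List (String × Int × Int) :=
  let lines := PySem.Str.splitlines text
  if lines.length = 0 then []
  else pvOuterB lines (pvBuildP lines) chunk_size overlap 0 []

-- ===== PRECONDITION & SPEC =====
def Spec_split_by_lines_py (text : String) (chunk_size : Int) (overlap : Int) (out : List (String × Int × Int)) : Prop := out = split_by_lines_py_alt text chunk_size overlap
instance (text : String) (chunk_size : Int) (overlap : Int) (out : List (String × Int × Int)) : Decidable (Spec_split_by_lines_py text chunk_size overlap out) := by unfold Spec_split_by_lines_py; infer_instance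

-- ===== CLAIM (what is proved, stated in full; the proofs are below) =====
def Claim_equal_split_by_lines_py : Prop := ∀ (text : String) (chunk_size : Int) (overlap : Int), Dom_split_by_lines_py text chunk_size overlap → Spec_split_by_lines_py text chunk_size overlap (split_by_lines_py text chunk_size overlap)

-- ===== LEMMAS AND PROOFS =====

-- P[i] = sum of len(lines[j]) + 1 over j < i
def pvPlen (lines : List String) (i : Nat) : Int :=
  ((lines.take i).map (fun s => PySem.Str.len s + 1)).sum

theorem pvStrLen_nonneg (s : String) : 0 ≤ PySem.Str.len s := by
  simp

theorem pvPlen_zero (lines : List String) : pvPlen lines 0 = 0 := by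
  simp [pvPlen]

theorem pvPlen_succ (lines : List String) (i : Nat) (h : i < lines.length) :
    pvPlen lines (i + 1) = pvPlen lines i + (PySem.Str.len (lines.getD i "") + 1) := by
  unfold pvPlen
  rw [List.take_add_one, List.getElem?_eq_getElem h, List.map_append, List.sum_append]
  simp [List.getD, List.getElem?_eq_getElem h]

theorem pvPlen_lt (lines : List String) (i j : Nat) (hij : i < j) (hj : j ≤ lines.length) :
    pvPlen lines i < pvPlen lines j := by
  induction j with
  | zero => omega
  | succ k ih =>
    have hk : k < lines.length := by omega
    rw [pvPlen_succ lines k hk]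
    have hnn := pvStrLen_nonneg (lines.getD k "")
    rcases Nat.lt_succ_iff_lt_or_eq.mp hij with h | h
    · have := ih h (by omega); omega
    · subst h; omega

theorem pvPlen_cons (l : String) (ls : List String) (j : Nat) :
    pvPlen (l :: ls) (j + 1) = PySem.Str.len l + 1 + pvPlen ls j := by
  simp [pvPlen, List.take_succ_cons]

theorem pvBuildP_foldl (ls : List String) (acc : List Int) :
    ls.foldl (fun P ln => P ++ [PySem.List.pyGetD P (-1) 0 + PySem.Str.len ln + 1]) acc =
      acc ++ (List.range ls.length).map (fun k => PySem.List.pyGetD acc (-1) 0 + pvPlen ls (k + 1)) := by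
  induction ls generalizing acc with
  | nil => simp
  | cons l ls ih =>
    rw [List.foldl_cons, ih]
    simp only [PySem.List.pyGetD_neg_one_append_singleton, List.length_cons,
      List.range_succ_eq_map, List.map_cons, List.map_map, List.append_assoc,
      List.singleton_append]
    congr 1
    congr 1
    · simp [pvPlen, add_assoc]
    · refine List.map_congr_left ?_
      intro k _
      simp only [Function.comp_apply, Nat.succ_eq_add_one, pvPlen_cons]
      ring

theorem pvBuildP_getD (lines : List String) (i : Nat) (hi : i ≤ lines.length) :
    (pvBuildP lines).getD i 0 = pvPlen lines i := by
  unfold pvBuildP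
  rw [pvBuildP_foldl]
  have h0 : PySem.List.pyGetD [(0:Int)] (-1) 0 = 0 := by decide
  simp only [h0, zero_add, List.singleton_append]
  cases i with
  | zero => simp [pvPlen_zero]
  | succ k =>
    have hk : k < lines.length := by omega
    simp [List.getD_eq_getElem?_getD, hk]

-- uniqueness of the "first index ≥ lo in [lo,hi] satisfying p, else hi" characterisation
theorem pvLeast_unique (p : Nat → Prop) (lo hi r₁ r₂ : Nat)
    (b₁ : lo ≤ r₁ ∧ r₁ ≤ hi) (m₁ : ∀ j, lo ≤ j → j < r₁ → ¬ p j) (s₁ : r₁ = hi ∨ p r₁)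
    (b₂ : lo ≤ r₂ ∧ r₂ ≤ hi) (m₂ : ∀ j, lo ≤ j → j < r₂ → ¬ p j) (s₂ : r₂ = hi ∨ p r₂) :
    r₁ = r₂ := by
  rcases Nat.lt_trichotomy r₁ r₂ with h | h | h
  · exact absurd (s₁.resolve_left (by omega)) (m₂ r₁ b₁.1 h)
  · exact h
  · exact absurd (s₂.resolve_left (by omega)) (m₁ r₂ b₂.1 h)

theorem pvBisect_spec (P : List Int) (t : Int) (N : Nat)
    (mono : ∀ i j, i < j → j ≤ N → P.getD i 0 < P.getD j 0) :
    ∀ d lo hi, hi - lo = d → lo ≤ hi → hi ≤ N →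
      lo ≤ pvBisect P t lo hi ∧ pvBisect P t lo hi ≤ hi ∧
      (∀ j, lo ≤ j → j < pvBisect P t lo hi → P.getD j 0 < t) ∧
      (pvBisect P t lo hi = hi ∨ t ≤ P.getD (pvBisect P t lo hi) 0) := by
  intro d
  induction d using Nat.strong_induction_on with
  | _ d ih =>
  intro lo hi hd hlh hhN
  rw [pvBisect]
  split_ifs with h
  · have hmid1 : lo ≤ (lo + hi) / 2 := by omega
    have hmid2 : (lo + hi) / 2 < hi := by omega
    simp only [PySem.List.pyGetD_natCast]
    split_ifs with hc
    · obtain ⟨r1, r2, r3, r4⟩ := ih (hi - ((lo + hi) / 2 + 1)) (by omega)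
        ((lo + hi) / 2 + 1) hi rfl (by omega) hhN
      refine ⟨by omega, r2, ?_, r4⟩
      intro j hj1 hj2
      by_cases hjm : j < (lo + hi) / 2 + 1
      · rcases Nat.lt_or_ge j ((lo + hi) / 2) with hj | hj
        · exact lt_trans (mono j ((lo + hi) / 2) hj (by omega)) hc
        · have : j = (lo + hi) / 2 := by omega
          rw [this]; exact hc
      · exact r3 j (by omega) hj2
    · obtain ⟨r1, r2, r3, r4⟩ := ih ((lo + hi) / 2 - lo) (by omega)
        lo ((lo + hi) / 2) rfl (by omega) (by omega)
      refine ⟨r1, by omega, r3, ?_⟩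
      rcases r4 with h4 | h4
      · right; rw [h4]; omega
      · right; exact h4
  · exact ⟨le_refl _, hlh, fun j h1 h2 => by omega, by omega⟩

theorem pvInnerA_spec (ls : List String) (cs : Int) (start : Nat) :
    ∀ k e, ls.length - e = k → start ≤ e → e ≤ ls.length →
      e ≤ pvInnerA ls cs e (pvPlen ls e - pvPlen ls start) ∧
      pvInnerA ls cs e (pvPlen ls e - pvPlen ls start) ≤ ls.length ∧
      (∀ j, e ≤ j → j < pvInnerA ls cs e (pvPlen ls e - pvPlen ls start) →
        pvPlen ls j - pvPlen ls start < cs) ∧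
      (pvInnerA ls cs e (pvPlen ls e - pvPlen ls start) = ls.length ∨
        cs ≤ pvPlen ls (pvInnerA ls cs e (pvPlen ls e - pvPlen ls start)) - pvPlen ls start) := by
  intro k
  induction k using Nat.strong_induction_on with
  | _ k ih =>
  intro e hk he hel
  rw [pvInnerA]
  split_ifs with h
  · have hlt : e < ls.length := h.1
    have hstep : pvPlen ls e - pvPlen ls start +
        PySem.Str.len (PySem.List.pyGetD ls (e : Int) "") + 1 =
        pvPlen ls (e + 1) - pvPlen ls start := by
      rw [PySem.List.pyGetD_natCast, pvPlen_succ ls e hlt]; ring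
    rw [hstep]
    obtain ⟨r1, r2, r3, r4⟩ := ih (ls.length - (e + 1)) (by omega) (e + 1) rfl (by omega) (by omega)
    refine ⟨by omega, r2, ?_, r4⟩
    intro j hj1 hj2
    rcases Nat.lt_or_ge j (e + 1) with hj | hj
    · have : j = e := by omega
      rw [this]; exact h.2
    · exact r3 j hj hj2
  · refine ⟨le_refl _, hel, fun j h1 h2 => by omega, ?_⟩
    rcases Nat.lt_or_ge e ls.length with h1 | h1
    · right
      have : ¬ pvPlen ls e - pvPlen ls start < cs := fun hc => h ⟨h1, hc⟩
      omega
    · left; omega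

-- the two end-of-chunk computations agree
theorem pvEnd_eq (ls : List String) (cs : Int) (start : Nat) (h : start < ls.length) :
    (if pvInnerA ls cs start 0 ≤ start then start + 1 else pvInnerA ls cs start 0) =
      pvBisect (pvBuildP ls) ((pvBuildP ls).getD start 0 + cs) (start + 1) ls.length := by
  have hg : ∀ i, i ≤ ls.length → (pvBuildP ls).getD i 0 = pvPlen ls i := fun i hi =>
    pvBuildP_getD ls i hi
  have mono : ∀ i j, i < j → j ≤ ls.length →
      (pvBuildP ls).getD i 0 < (pvBuildP ls).getD j 0 := by
    intro i j hij hj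
    rw [hg i (by omega), hg j hj]
    exact pvPlen_lt ls i j hij hj
  have A := pvInnerA_spec ls cs start (ls.length - start) start rfl le_rfl (le_of_lt h)
  rw [sub_self] at A
  obtain ⟨a1, a2, a3, a4⟩ := A
  rw [hg start (le_of_lt h)]
  obtain ⟨b1, b2, b3, b4⟩ := pvBisect_spec (pvBuildP ls) (pvPlen ls start + cs)
    ls.length mono (ls.length - (start + 1)) (start + 1) ls.length rfl (by omega) le_rfl
  by_cases hcs : 0 < cs
  · have hA1 : ¬ pvInnerA ls cs start 0 ≤ start := by
      intro hle
      have : pvInnerA ls cs start 0 = start := by omega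
      rw [this] at a4
      rcases a4 with h4 | h4
      · omega
      · rw [sub_self] at h4; omega
    rw [if_neg hA1]
    refine pvLeast_unique (fun j => cs ≤ pvPlen ls j - pvPlen ls start) (start + 1) ls.length _ _
      ⟨by omega, a2⟩ ?_ ?_ ⟨b1, b2⟩ ?_ ?_
    · intro j hj1 hj2
      have := a3 j (by omega) hj2
      omega
    · rcases a4 with h4 | h4
      · exact Or.inl h4
      · exact Or.inr (by omega)
    · intro j hj1 hj2
      have hjn : j ≤ ls.length := by omega
      have := b3 j hj1 hj2
      rw [hg j hjn] at this
      omega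
    · rcases b4 with h4 | h4
      · exact Or.inl h4
      · right
        rw [hg _ b2] at h4
        omega
  · have hA0 : pvInnerA ls cs start 0 ≤ start := by
      by_contra hgt
      have := a3 start le_rfl (by omega)
      rw [sub_self] at this
      omega
    rw [if_pos hA0]
    by_contra hne
    have hlt : start + 1 < pvBisect (pvBuildP ls) (pvPlen ls start + cs)
        (start + 1) ls.length := by omega
    have hb := b3 (start + 1) le_rfl hlt
    rw [hg (start + 1) (by omega)] at hb
    have := pvPlen_lt ls start (start + 1) (by omega) (by omega)
    omega

theorem pvOuter_eq (ls : List String) (cs ov : Int) :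
    ∀ k start acc, ls.length - start = k →
      pvOuterA ls cs ov start acc = pvOuterB ls (pvBuildP ls) cs ov start acc := by
  intro k
  induction k using Nat.strong_induction_on with
  | _ k ih =>
  intro start acc hk
  rw [pvOuterA, pvOuterB]
  split_ifs with h
  · simp only [PySem.List.pyGetD_natCast]
    rw [← pvEnd_eq ls cs start h]
    exact ih _ (by split_ifs <;> omega) _ _ rfl
  · rfl

-- ===== VERDICT (by name: the statement is the Claim_ definition above) =====
theorem split_by_lines_py_spec : Claim_equal_split_by_lines_py := by
  intro text cs ov _
  unfold Spec_split_by_lines_py split_by_lines_py split_by_lines_py_alt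
  by_cases h : PySem.Str.splitlines text = []
  · simp [h]
  · simp only [h, List.length_eq_zero_iff]
    exact pvOuter_eq (PySem.Str.splitlines text) cs ov _ 0 [] rfl
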